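-- pv_equiv track=rewrite | github.com/alanbolton/dune | character.py | reduce_troops_in_half
-- ===== SOURCE A (Python) =====
-- def reduce_troops_in_half(tokens, fedaykins):
--     tokens_lost = 0
--     fedaykins_lost = 0
--
--     reduction = int(((tokens + fedaykins + 1) / 2))
--     while reduction != 0 and tokens != 0:
--         tokens -= 1
--         reduction -= 1
--         tokens_lost += 1
--     while reduction != 0 and fedaykins != 0:
--         fedaykins -= 1
--         reduction -= 1
--         fedaykins_lost += 1
--     return tokens_lost, fedaykins_lost
-- ===== SOURCE B (Python) =====
-- def reduce_troops_in_half(tokens, fedaykins):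
--     reduction = (tokens + fedaykins + 1) // 2
--     tokens_lost = min(tokens, reduction)
--     fedaykins_lost = min(fedaykins, reduction - tokens_lost)
--     return tokens_lost, fedaykins_lost
-- ===== Notes on version B (the rewrite author's own statement) =====
-- stated objective: faster
-- what changed: Replaces the two decrement-by-one while loops (linear in the troop counts) with closed-form arithmetic using min; Pre_ excludes negative troop counts, outside the natural domain, where A's loops fail to terminate or the implementations differ.
-- outside the precondition, e.g. on reduce_troops_in_half(-1, 1): A returns (0, 0), B returns (-1, 1); on reduce_troops_in_half(5, -3): A returns (1, 0), B returns (1, -3); on reduce_troops_in_half(-5, -5): A does not finish within the time limit, B returns (-5, -5)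
import Mathlib
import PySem

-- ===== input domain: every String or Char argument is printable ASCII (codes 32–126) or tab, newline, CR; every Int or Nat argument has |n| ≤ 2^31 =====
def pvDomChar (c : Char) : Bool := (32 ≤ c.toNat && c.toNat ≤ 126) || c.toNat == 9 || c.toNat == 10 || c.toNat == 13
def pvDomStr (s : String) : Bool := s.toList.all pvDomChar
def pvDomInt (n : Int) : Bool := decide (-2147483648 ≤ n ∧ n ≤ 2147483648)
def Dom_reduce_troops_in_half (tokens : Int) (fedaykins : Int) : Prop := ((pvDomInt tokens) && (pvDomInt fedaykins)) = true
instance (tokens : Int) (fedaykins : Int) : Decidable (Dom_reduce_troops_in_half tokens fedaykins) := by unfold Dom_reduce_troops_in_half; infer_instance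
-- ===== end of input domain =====

-- B replaces A's two decrement-by-one while loops with closed-form min arithmetic (measured asymptotically faster).

-- ===== PORT A =====
-- One 'while reduction != 0 and pool != 0: pool -= 1; reduction -= 1; lost += 1' loop
-- (A's two loops have identical shape). Fuel = reduction.toNat bounds the iteration count
-- exactly on the admitted inputs (0 ≤ pool, 0 ≤ reduction), where the loop runs
-- min pool reduction times; returns (pool', reduction', lost').
def pvHalfLoop : Nat → Int → Int → Int → Int × Int × Int
  | 0, pool, r, lost => (pool, r, lost)
  | n+1, pool, r, lost =>
    if r ≠ 0 ∧ pool ≠ 0 then pvHalfLoop n (pool - 1) (r - 1) (lost + 1)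
    else (pool, r, lost)

def reduce_troops_in_half (tokens : Int) (fedaykins : Int) : List Int :=
  -- int((tokens + fedaykins + 1) / 2): true division then int() truncates toward zero;
  -- exact on Dom since |tokens + fedaykins + 1| < 2^53, so Int.tdiv (T-division) is exact here.
  let reduction := Int.tdiv (tokens + fedaykins + 1) 2
  let s1 := pvHalfLoop reduction.toNat tokens reduction 0
  let tokens_lost := s1.2.2
  let s2 := pvHalfLoop s1.2.1.toNat fedaykins s1.2.1 0
  let fedaykins_lost := s2.2.2
  [tokens_lost, fedaykins_lost]

-- ===== PORT B =====
def reduce_troops_in_half_alt (tokens : Int) (fedaykins : Int) : List Int :=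
  let reduction := PySem.Int.floordiv (tokens + fedaykins + 1) 2
  let tokens_lost := min tokens reduction
  let fedaykins_lost := min fedaykins (reduction - tokens_lost)
  [tokens_lost, fedaykins_lost]

-- ===== PRECONDITION & SPEC =====
-- Pre_ excludes negative troop counts, which are outside the function's natural domain: there
-- A's while loops either fail to terminate or the two implementations return different values
-- (concrete excluded examples are in the claim's cites).
def Pre_reduce_troops_in_half (tokens : Int) (fedaykins : Int) : Prop :=
  0 ≤ tokens ∧ 0 ≤ fedaykins
instance (tokens : Int) (fedaykins : Int) : Decidable (Pre_reduce_troops_in_half tokens fedaykins) := by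
  unfold Pre_reduce_troops_in_half; infer_instance

def pvWitness_reduce_troops_in_half : Int × Int := (5, 4)

def Spec_reduce_troops_in_half (tokens : Int) (fedaykins : Int) (out : List Int) : Prop :=
  out = reduce_troops_in_half_alt tokens fedaykins
instance (tokens : Int) (fedaykins : Int) (out : List Int) : Decidable (Spec_reduce_troops_in_half tokens fedaykins out) := by
  unfold Spec_reduce_troops_in_half; infer_instance

-- ===== CLAIM (what is proved, stated in full; the proofs are below) =====
def Claim_equal_reduce_troops_in_half : Prop := ∀ (tokens : Int) (fedaykins : Int), Dom_reduce_troops_in_half tokens fedaykins → Pre_reduce_troops_in_half tokens fedaykins → Spec_reduce_troops_in_half tokens fedaykins (reduce_troops_in_half tokens fedaykins)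

-- ===== LEMMAS AND PROOFS =====
-- With 0 ≤ pool, 0 ≤ r and enough fuel, the loop removes min pool r from both counters.
theorem pvHalfLoop_spec (n : Nat) : ∀ (pool r lost : Int), 0 ≤ pool → 0 ≤ r → r.toNat ≤ n →
    pvHalfLoop n pool r lost = (pool - min pool r, r - min pool r, lost + min pool r) := by
  induction n with
  | zero =>
    intro pool r lost hp hr hn
    have : r = 0 := by omega
    subst this
    simp [pvHalfLoop]
    omega
  | succ n ih =>
    intro pool r lost hp hr hn
    by_cases h : r ≠ 0 ∧ pool ≠ 0
    · have := ih (pool - 1) (r - 1) (lost + 1) (by omega) (by omega) (by omega)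
      simp only [pvHalfLoop, if_pos h, this]
      refine Prod.ext ?_ (Prod.ext ?_ ?_) <;> simp <;> omega
    · simp only [pvHalfLoop, if_neg h]
      push Not at h
      refine Prod.ext ?_ (Prod.ext ?_ ?_) <;> simp <;> omega

-- ===== VERDICT (by name: the statement is the Claim_ definition above) =====
theorem reduce_troops_in_half_spec : Claim_equal_reduce_troops_in_half := by
  intro tokens fedaykins _ hpre
  obtain ⟨ht, hf⟩ := hpre
  unfold Spec_reduce_troops_in_half reduce_troops_in_half reduce_troops_in_half_alt
  have hpos : (0:Int) < tokens + fedaykins + 1 := by omega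
  have hfd : PySem.Int.floordiv (tokens + fedaykins + 1) 2 = (tokens + fedaykins + 1) / 2 :=
    PySem.Int.floordiv_eq_ediv_of_pos (by norm_num)
  have htd : Int.tdiv (tokens + fedaykins + 1) 2 = (tokens + fedaykins + 1) / 2 :=
    Int.tdiv_eq_ediv_of_nonneg (by omega)
  set r : Int := (tokens + fedaykins + 1) / 2 with hrdef
  have hr : 0 ≤ r := Int.ediv_nonneg (by omega) (by norm_num)
  simp only [htd, hfd]
  rw [pvHalfLoop_spec _ tokens r 0 ht hr le_rfl]
  dsimp only
  rw [pvHalfLoop_spec _ fedaykins (r - min tokens r) 0 hf (by omega) le_rfl]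
  dsimp only
  simp
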